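-- pv_equiv track=rewrite | github.com/Crayz310/Legacy | legacy/modules/LimokaLegacy.py | find_userbot
-- ===== SOURCE A (Python) =====
-- from collections import Counter, defaultdict
-- from typing import Iterable, Union, List, Dict, Any, Optional
--
-- WEIGHTS = {
--     "inline.token_obtainment": 15,
--     "main": 10,
--     "inline": 7,
--     "translations": 5,
--     "security": 3,
-- }
--
-- DEFAULT_WEIGHT = 1
--
-- def find_userbot(keys: Iterable[str]) -> str | None:
--     scores = defaultdict(int)
--
--     for key in keys:
--         parts = key.split(".")
--
--         for i in range(1, len(parts)):
--             prefix = ".".join(parts[:i])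
--             suffix = ".".join(parts[i:])
--
--             weight = WEIGHTS.get(suffix, DEFAULT_WEIGHT)
--
--             scores[prefix] += weight
--
--     if not scores:
--         return None
--
--     return max(scores, key=scores.get)
-- ===== SOURCE B (Python) =====
-- WEIGHTS = {
--     "inline.token_obtainment": 15,
--     "main": 10,
--     "inline": 7,
--     "translations": 5,
--     "security": 3,
-- }
--
-- DEFAULT_WEIGHT = 1
--
-- def find_userbot(keys):
--     # Every split point of a key sits at a dot, and every suffix weighs
--     # DEFAULT_WEIGHT except the five table entries.  So: one char scan per key
--     # adds 1 to the text before each dot, and the table is consulted only a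
--     # constant number of times per key, via endswith from the right, to add the
--     # remaining (w - 1) bonus.  No suffix string and no parts list is built.
--     scores = {}
--     for key in keys:
--         pre = ""
--         for ch in key:
--             if ch == ".":
--                 scores[pre] = scores.get(pre, 0) + 1
--             pre = pre + ch
--         for suf, w in WEIGHTS.items():
--             dotted = "." + suf
--             if key.endswith(dotted):
--                 p = key[:len(key) - len(dotted)]
--                 scores[p] = scores.get(p, 0) + (w - 1)
--     best = None
--     best_score = None
--     for k, v in scores.items():
--         if best_score is None or v > best_score:
--             best, best_score = k, v
--     return best
-- ===== Notes on version B (the rewrite author's own statement) =====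
-- stated objective: alternative
-- what changed: B never builds the parts list or any suffix string and never looks a suffix up in the weight table per split point: one character scan per key adds 1 to the text before every dot, and the five weighted suffixes are located by a constant-size endswith pass from the right that adds the remaining (w-1) bonus; the final max is one explicit scan (the per-character Python loop trades A's C-level split/join for fewer allocations, and is not measurably faster).
import Mathlib
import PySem

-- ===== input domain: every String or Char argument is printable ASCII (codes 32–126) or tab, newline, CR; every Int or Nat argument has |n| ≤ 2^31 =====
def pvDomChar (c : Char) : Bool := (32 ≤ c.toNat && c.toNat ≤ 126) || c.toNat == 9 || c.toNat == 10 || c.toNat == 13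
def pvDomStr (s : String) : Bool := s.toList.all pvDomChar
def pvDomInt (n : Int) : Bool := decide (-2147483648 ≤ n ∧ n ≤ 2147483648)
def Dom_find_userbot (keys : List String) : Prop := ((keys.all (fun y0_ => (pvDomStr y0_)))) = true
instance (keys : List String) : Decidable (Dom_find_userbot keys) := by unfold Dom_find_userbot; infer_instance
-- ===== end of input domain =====

-- B scores the same dotted keys without ever building the parts list, a suffix string, or a
-- per-split weight lookup: one character scan adds 1 to the text before every dot, and the five
-- weighted suffixes of the table are located by a constant-size endswith pass from the right.

-- ===== PORT A =====
-- the module constant WEIGHTS (a dict literal with distinct keys, insertion order)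
def pvWeights : PySem.Dict String Int :=
  PySem.Dict.mk [("inline.token_obtainment", 15), ("main", 10), ("inline", 7),
                 ("translations", 5), ("security", 3)]

def find_userbot (keys : List String) : Option String :=
  let scores : PySem.Dict String Int :=
    keys.foldl (fun scores key =>
      -- parts = key.split("."); the separator "." is a nonempty literal, so split? is always some
      let parts := (PySem.Str.split? key ".").getD []
      -- for i in range(1, len(parts)):
      (PySem.List.pyRange 1 (parts.length : Int)).foldl (fun scores i =>
        let pfx := PySem.Str.join "." (PySem.List.slice parts none (some i))
        let sfx := PySem.Str.join "." (PySem.List.slice parts (some i) none)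
        let weight := pvWeights.getD sfx 1
        -- defaultdict(int): scores[pfx] += weight
        scores.modify pfx 0 (· + weight)) scores) PySem.Dict.empty
  if scores.items.isEmpty then none
  else PySem.List.max? scores.keys (fun k => scores.getD k 0)

-- ===== PORT B =====
def find_userbot_alt (keys : List String) : Option String :=
  let scores : PySem.Dict String Int :=
    keys.foldl (fun scores key =>
      -- one character scan: every dot is a split point, the text before it scores 1
      let sp := key.toList.foldl (fun (sp : PySem.Dict String Int × String) c =>
          if c = '.' then (sp.1.modify sp.2 0 (· + 1), sp.2.push c)
          else (sp.1, sp.2.push c)) (scores, "")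
      -- the five weighted suffixes are checked directly from the right
      pvWeights.items.foldl (fun sc e =>
        let dotted := "." ++ e.1
        if PySem.Str.endswith key dotted then
          let p := PySem.Str.slice key none (some (PySem.Str.len key - PySem.Str.len dotted))
          sc.modify p 0 (· + (e.2 - 1))
        else sc) sp.1) PySem.Dict.empty
  (scores.items.foldl (fun best kv =>
      match best with
      | none => some kv
      | some m => if m.2 < kv.2 then some kv else some m) none).map Prod.fst

-- ===== PRECONDITION & SPEC =====
def Spec_find_userbot (keys : List String) (out : Option String) : Prop := out = find_userbot_alt keys
instance (keys : List String) (out : Option String) : Decidable (Spec_find_userbot keys out) := by unfold Spec_find_userbot; infer_instance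

-- ===== CLAIM (what is proved, stated in full; the proofs are below) =====
def Claim_equal_find_userbot : Prop := ∀ (keys : List String), Dom_find_userbot keys → Spec_find_userbot keys (find_userbot keys)

-- ===== LEMMAS AND PROOFS =====

def mySplit (pre : List Char) : List Char → List (List Char)
  | [] => [pre]
  | c :: cs => if c = '.' then pre :: mySplit [] cs else mySplit (pre ++ [c]) cs

lemma mySplit_ne_nil (pre : List Char) (cs : List Char) : mySplit pre cs ≠ [] := by
  induction cs generalizing pre with
  | nil => simp [mySplit]
  | cons c cs ih => by_cases h : c = '.' <;> simp [mySplit, h] <;> exact ih _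

lemma splitOn_go_eq : ∀ (fuel : Nat) (l cur _acc : List Char) (hacc : List (List Char)),
    l.length < fuel →
    PySem.Chars.splitOn.go ['.'] fuel l cur hacc = hacc.reverse ++ mySplit cur.reverse l := by
  intro fuel
  induction fuel with
  | zero => intro l cur _acc hacc h; omega
  | succ f ih =>
    intro l cur _acc hacc h
    cases l with
    | nil => simp [PySem.Chars.splitOn.go, mySplit]
    | cons c rest =>
      rw [PySem.Chars.splitOn.go]
      by_cases hc : c = '.'
      · subst hc
        have hp : List.isPrefixOf ['.'] ('.' :: rest) = true := by simp [List.isPrefixOf]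
        simp only [hp, if_pos]
        rw [ih _ _ [] _ (by simpa using Nat.lt_of_succ_lt_succ h)]
        simp [mySplit]
      · have hp : List.isPrefixOf ['.'] (c :: rest) = false := by
          simp [List.isPrefixOf]; exact fun hh => absurd hh.symm hc
        simp only [hp]
        rw [if_neg (by simp)]
        rw [ih _ _ [] _ (by simpa using Nat.lt_of_succ_lt_succ h)]
        simp [mySplit, hc]

lemma split_eq (key : String) :
    PySem.Str.split? key "." = some ((mySplit [] key.toList).map String.ofList) := by
  have hdot : ("." : String).toList = ['.'] := rfl
  rw [PySem.Str.split?, PySem.Chars.split?, hdot]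
  rw [if_neg (by simp)]
  rw [PySem.Chars.splitOn]
  rw [splitOn_go_eq _ _ _ [] [] (by omega)]
  simp

def cJ (l : List (List Char)) : List Char := PySem.Chars.join ['.'] l
def sJ (l : List String) : String := PySem.Str.join "." l

lemma sJ_map_ofList (l : List (List Char)) : sJ (l.map String.ofList) = String.ofList (cJ l) := by
  apply String.toList_inj.mp
  rw [sJ, PySem.Str.toList_join, String.toList_ofList]
  have h2 : ∀ (m : List (List Char)), (m.map String.ofList).map String.toList = m := by
    intro m
    induction m with
    | nil => rfl
    | cons x xs ih => rw [List.map_cons, List.map_cons, String.toList_ofList, ih]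
  rw [h2, String.toList_ofList, cJ]

lemma cJ_round (pre cs : List Char) : cJ (mySplit pre cs) = pre ++ cs := by
  induction cs generalizing pre with
  | nil => simp [mySplit, cJ, PySem.Chars.join_singleton]
  | cons c cs ih =>
    by_cases h : c = '.'
    · subst h
      rw [mySplit, if_pos rfl]
      obtain ⟨q, qs, hq⟩ : ∃ q qs, mySplit [] cs = q :: qs := by
        cases hm : mySplit [] cs with
        | nil => exact absurd hm (mySplit_ne_nil _ _)
        | cons q qs => exact ⟨q, qs, rfl⟩
      have hcs := ih ([] : List Char)
      rw [hq] at hcs ⊢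
      rw [show cJ (pre :: q :: qs) = pre ++ '.' :: cJ (q :: qs) by
            simp [cJ, PySem.Chars.join_cons_cons]]
      simp at hcs
      simp [hcs]
    · rw [mySplit, if_neg h, ih]
      simp

def pl (P : String) : List String → List (String × String)
  | [] => []
  | q :: qs => (P, sJ (q :: qs)) :: pl (P ++ "." ++ q) qs

def dpre (P : List Char) : List Char → List (String × String)
  | [] => []
  | c :: cs => if c = '.' then (String.ofList P, String.ofList cs) :: dpre (P ++ [c]) cs
               else dpre (P ++ [c]) cs

lemma plShift : ∀ (qs : List String) (q X : String),
    pl (X ++ q) qs = (pl q qs).map (fun t => (X ++ t.1, t.2))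
  | [], q, X => rfl
  | r :: rs, q, X => by
    rw [pl, pl, List.map_cons]
    refine congrArg₂ _ rfl ?_
    rw [show X ++ q ++ "." ++ r = X ++ (q ++ "." ++ r) by simp only [String.append_assoc]]
    exact plShift rs (q ++ "." ++ r) X

lemma dpreShift : ∀ (cs P X : List Char),
    dpre (X ++ P) cs = (dpre P cs).map (fun t => (String.ofList X ++ t.1, t.2))
  | [], P, X => rfl
  | c :: cs, P, X => by
    by_cases h : c = '.'
    · subst h
      rw [dpre, if_pos rfl, dpre, if_pos rfl, List.map_cons]
      refine congrArg₂ _ (by rw [String.ofList_append]) ?_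
      rw [List.append_assoc]
      exact dpreShift cs (P ++ ['.']) X
    · rw [dpre, if_neg h, dpre, if_neg h, List.append_assoc]
      exact dpreShift cs (P ++ [c]) X

lemma main_pl_dpre : ∀ (cs pre : List Char) (p : String) (rest : List String),
    (mySplit pre cs).map String.ofList = p :: rest → pl p rest = dpre pre cs := by
  intro cs
  induction cs with
  | nil =>
    intro pre p rest h
    simp [mySplit] at h
    obtain ⟨h1, h2⟩ := h
    subst h1; subst h2
    rfl
  | cons c cs ih =>
    intro pre p rest h
    by_cases hc : c = '.'
    · subst hc
      rw [mySplit, if_pos rfl, List.map_cons] at h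
      obtain ⟨q, qs, hq⟩ : ∃ q qs, mySplit [] cs = q :: qs := by
        cases hm : mySplit [] cs with
        | nil => exact absurd hm (mySplit_ne_nil _ _)
        | cons q qs => exact ⟨q, qs, rfl⟩
      injection h with h1 h2
      subst h1
      rw [dpre, if_pos rfl]
      rw [← h2]
      have hrest : (mySplit [] cs).map String.ofList = String.ofList q :: qs.map String.ofList := by
        rw [hq, List.map_cons]
      rw [hq, List.map_cons, pl]
      refine congrArg₂ _ ?_ ?_
      · -- head
        refine congrArg₂ _ rfl ?_
        rw [← List.map_cons, ← hq, sJ_map_ofList, cJ_round]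
        rw [List.nil_append]
      · -- tail
        have ihq := ih ([] : List Char) (String.ofList q) (qs.map String.ofList) (by rw [hq, List.map_cons])
        rw [show String.ofList pre ++ "." ++ String.ofList q
              = (String.ofList pre ++ ".") ++ String.ofList q by rw [String.append_assoc]]
        rw [plShift, ihq]
        have := dpreShift cs [] (pre ++ ['.'])
        rw [List.append_nil] at this
        rw [this]
        refine List.map_congr_left ?_
        intro t _
        simp [String.ofList_append, String.append_assoc]
    · rw [mySplit, if_neg hc] at h
      rw [dpre, if_neg hc]
      exact ih _ _ _ h

lemma sJ_singleton (p : String) : sJ [p] = p := by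
  apply String.toList_inj.mp
  simp [sJ, PySem.Str.toList_join, PySem.Chars.join_singleton]

lemma sJ_cons_cons (p q : String) (rest : List String) :
    sJ (p :: q :: rest) = p ++ "." ++ sJ (q :: rest) := by
  apply String.toList_inj.mp
  simp [sJ, PySem.Str.toList_join, PySem.Chars.join_cons_cons, String.toList_append]

lemma sJ_append_singleton : ∀ (pre : List String), pre ≠ [] → ∀ (q : String),
    sJ (pre ++ [q]) = sJ pre ++ "." ++ q
  | [], h, _ => absurd rfl h
  | [x], _, q => by rw [List.singleton_append, sJ_cons_cons, sJ_singleton, sJ_singleton]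
  | x :: y :: ys, _, q => by
    have ih := sJ_append_singleton (y :: ys) (by simp) q
    show sJ (x :: y :: (ys ++ [q])) = sJ (x :: y :: ys) ++ "." ++ q
    rw [sJ_cons_cons x y (ys ++ [q]), sJ_cons_cons x y ys,
        show (y :: (ys ++ [q])) = (y :: ys) ++ [q] from rfl, ih]
    apply String.toList_inj.mp
    simp [String.toList_append]

def pvSplits (pre : List String) : List String → List (List String × List String)
  | [] => []
  | q :: qs => (pre, q :: qs) :: pvSplits (pre ++ [q]) qs

lemma pvSplits_eq : ∀ (rest pre : List String),
    (PySem.List.pyRange (pre.length : Int) ((pre.length : Int) + (rest.length : Int))).map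
      (fun i => (List.take i.toNat (pre ++ rest), List.drop i.toNat (pre ++ rest)))
    = pvSplits pre rest
  | [], pre => by
    rw [show ((pre.length : Int) + (([] : List String).length : Int)) = (pre.length : Int) by simp,
        PySem.List.pyRange_one_eq_nil (le_refl _), List.map_nil, pvSplits]
  | q :: qs, pre => by
    have hlt : (pre.length : Int) < (pre.length : Int) + ((q :: qs).length : Int) := by
      simp
    rw [PySem.List.pyRange_one_cons hlt, List.map_cons]
    have h1 : (List.take ((pre.length : Int)).toNat (pre ++ q :: qs),
               List.drop ((pre.length : Int)).toNat (pre ++ q :: qs)) = (pre, q :: qs) := by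
      simp
    rw [h1]
    have ih := pvSplits_eq qs (pre ++ [q])
    have harg : (pre.length : Int) + 1 = ((pre ++ [q]).length : Int) := by simp
    have harg2 : (pre.length : Int) + ((q :: qs).length : Int)
        = ((pre ++ [q]).length : Int) + (qs.length : Int) := by simp; omega
    have hparts : pre ++ q :: qs = (pre ++ [q]) ++ qs := by simp
    rw [pvSplits, harg, harg2, hparts, ih]

def pvStep (d : PySem.Dict String Int) (pr : List String × List String) : PySem.Dict String Int :=
  d.insert (sJ pr.1) (d.getD (sJ pr.1) 0 + pvWeights.getD (sJ pr.2) 1)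

lemma a_inner (p : String) (rest : List String) (d : PySem.Dict String Int) :
    (PySem.List.pyRange 1 (((p :: rest).length : Nat) : Int)).foldl (fun scores i =>
        let pfx := PySem.Str.join "." (PySem.List.slice (p :: rest) none (some i))
        let sfx := PySem.Str.join "." (PySem.List.slice (p :: rest) (some i) none)
        let weight := pvWeights.getD sfx 1
        scores.modify pfx 0 (· + weight)) d
    = (pvSplits [p] rest).foldl pvStep d := by
  rw [← pvSplits_eq rest [p]]
  have harg : (([p].length : Nat) : Int) = 1 := by simp
  have harg2 : (([p].length : Nat) : Int) + ((rest.length : Nat) : Int)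
      = (((p :: rest).length : Nat) : Int) := by simp; omega
  rw [harg2, harg, List.foldl_map]
  apply PySem.List.foldl_congr_mem
  intro acc i hi
  have hb := PySem.List.mem_pyRange_one.mp hi
  have h0 : (0 : Int) ≤ i := by omega
  show _ = pvStep acc (List.take i.toNat (p :: rest), List.drop i.toNat (p :: rest))
  simp only [PySem.List.slice_to _ h0, PySem.List.slice_from _ h0,
             PySem.Dict.modify, pvStep, sJ]

-- ==== new: pvSplits → pl ====
lemma pvp : ∀ (rest preL : List String), preL ≠ [] →
    (pvSplits preL rest).map (fun q => (sJ q.1, sJ q.2)) = pl (sJ preL) rest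
  | [], _, _ => rfl
  | q :: qs, preL, h => by
    rw [pvSplits, List.map_cons, pl]
    refine congrArg₂ _ rfl ?_
    rw [pvp qs (preL ++ [q]) (by simp), sJ_append_singleton preL h q]

-- A's per-key inner fold, expressed over pl
lemma a_step_pl' (rest preL : List String) (h : preL ≠ []) (d : PySem.Dict String Int) :
    (pvSplits preL rest).foldl pvStep d
    = (pl (sJ preL) rest).foldl (fun d t => d.modify t.1 0 (· + pvWeights.getD t.2 1)) d := by
  rw [← pvp rest preL h, List.foldl_map]
  apply PySem.List.foldl_congr_mem
  intro acc t _
  simp only [PySem.Dict.modify, pvStep]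

lemma a_step_pl (p : String) (rest : List String) (d : PySem.Dict String Int) :
    (pvSplits [p] rest).foldl pvStep d
    = (pl p rest).foldl (fun d t => d.modify t.1 0 (· + pvWeights.getD t.2 1)) d := by
  rw [a_step_pl' rest [p] (by simp) d, sJ_singleton]

-- ==== B side ====
-- B's per-key character scan computes the +1 pass over dpre
lemma b_pass1 : ∀ (cs : List Char) (P : String) (d : PySem.Dict String Int),
    (cs.foldl (fun (sp : PySem.Dict String Int × String) c =>
        if c = '.' then (sp.1.modify sp.2 0 (· + 1), sp.2.push c)
        else (sp.1, sp.2.push c)) (d, P)).1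
    = (dpre P.toList cs).foldl (fun d t => d.modify t.1 0 (· + 1)) d
  | [], P, d => rfl
  | c :: cs, P, d => by
    by_cases h : c = '.'
    · subst h
      rw [List.foldl_cons, if_pos rfl, dpre, if_pos rfl, List.foldl_cons]
      rw [b_pass1 cs (P.push '.') (d.modify P 0 (· + 1))]
      rw [String.toList_push, String.ofList_toList]
    · rw [List.foldl_cons, if_neg h, dpre, if_neg h]
      rw [show ((d, P).1, (d, P).2.push c) = (d, P.push c) from rfl]
      rw [b_pass1 cs (P.push c) d, String.toList_push]

-- membership in dpre: exactly the decompositions of cs at a dot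
lemma mem_dpre : ∀ (cs P : List Char) (x y : String),
    (x, y) ∈ dpre P cs ↔ ∃ a b : List Char, cs = a ++ '.' :: b ∧
      x = String.ofList (P ++ a) ∧ y = String.ofList b := by
  intro cs
  induction cs with
  | nil => intro P x y; simp [dpre]
  | cons c cs ih =>
    intro P x y
    by_cases h : c = '.'
    · subst h
      rw [dpre, if_pos rfl]
      constructor
      · intro hm
        rcases List.mem_cons.mp hm with hh | ht
        · injection hh with h1 h2
          exact ⟨[], cs, by simp, by simpa using h1, h2⟩
        · obtain ⟨a, b, hab, hx, hy⟩ := (ih (P ++ ['.']) x y).mp ht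
          exact ⟨'.' :: a, b, by simp [hab], by simpa [List.append_assoc] using hx, hy⟩
      · rintro ⟨a, b, hab, hx, hy⟩
        cases a with
        | nil =>
          simp at hab
          obtain ⟨rfl⟩ := hab
          apply List.mem_cons.mpr
          left
          simp [hx, hy]
        | cons a0 arest =>
          simp at hab
          obtain ⟨rfl, hcs⟩ := hab
          apply List.mem_cons.mpr
          right
          exact (ih (P ++ ['.']) x y).mpr ⟨arest, b, hcs, by simpa [List.append_assoc] using hx, hy⟩
    · rw [dpre, if_neg h]
      rw [ih (P ++ [c]) x y]
      constructor
      · rintro ⟨a, b, hab, hx, hy⟩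
        exact ⟨c :: a, b, by simp [hab], by simpa [List.append_assoc] using hx, hy⟩
      · rintro ⟨a, b, hab, hx, hy⟩
        cases a with
        | nil => simp at hab; exact absurd hab.1 h
        | cons a0 arest =>
          simp at hab
          obtain ⟨rfl, hcs⟩ := hab
          exact ⟨arest, b, hcs, by simpa [List.append_assoc] using hx, hy⟩

-- suffixes in dpre get strictly shorter, so second components are pairwise distinct
lemma dpre_snd_len : ∀ (cs P : List Char) (t : String × String),
    t ∈ dpre P cs → t.2.toList.length < cs.length := by
  intro cs
  induction cs with
  | nil => intro P t h; simp [dpre] at h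
  | cons c cs ih =>
    intro P t h
    by_cases hc : c = '.'
    · subst hc
      rw [dpre, if_pos rfl] at h
      rcases List.mem_cons.mp h with hh | ht
      · subst hh; simp [String.toList_ofList]
      · exact Nat.lt_succ_of_lt (ih _ _ ht)
    · rw [dpre, if_neg hc] at h
      exact Nat.lt_succ_of_lt (ih _ _ h)

lemma dpre_pairwise (cs P : List Char) :
    (dpre P cs).Pairwise (fun s t => s.2 ≠ t.2) := by
  induction cs generalizing P with
  | nil => exact List.Pairwise.nil
  | cons c cs ih =>
    by_cases hc : c = '.'
    · subst hc
      rw [dpre, if_pos rfl]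
      refine List.Pairwise.cons ?_ (ih _)
      intro t ht heq
      have := dpre_snd_len cs (P ++ ['.']) t ht
      rw [← heq] at this
      simp [String.toList_ofList] at this
    · rw [dpre, if_neg hc]
      exact ih _

-- value of a dict after a fold of additive modifies
lemma getD_foldl_modify_amt : ∀ (L : List (String × String)) (amt : String × String → Int)
    (d : PySem.Dict String Int) (k : String),
    (L.foldl (fun d t => d.modify t.1 0 (· + amt t)) d).getD k 0
    = d.getD k 0 + ((L.filter (fun t => t.1 = k)).map amt).sum
  | [], _, _, _ => by simp
  | t :: L, amt, d, k => by
    rw [List.foldl_cons, getD_foldl_modify_amt L amt _ k, PySem.Dict.getD_modify]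
    by_cases h : k = t.1
    · rw [if_pos h, List.filter_cons, if_pos (by simp [h]), List.map_cons, List.sum_cons]
      subst h
      ring
    · rw [if_neg h, List.filter_cons, if_neg (by simp; exact fun hh => absurd hh.symm h)]

-- keys of a dict after a fold of modifies (special case of keys_foldl_modify_key)
lemma keys_foldl_modify_amt (L : List (String × String)) (amt : String × String → Int)
    (d : PySem.Dict String Int) :
    (L.foldl (fun d t => d.modify t.1 0 (· + amt t)) d).keys
    = PySem.Set.update d.keys (L.map (fun t => t.1)) :=
  PySem.Dict.keys_foldl_modify_key L (fun t => t.1) 0 (fun _ t => (· + amt t)) d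

-- the weight of a suffix, as DEFAULT_WEIGHT plus one bonus per table entry
lemma weight_expand (y : String) :
    pvWeights.getD y 1
    = 1 + ((if y = "inline.token_obtainment" then (14:Int) else 0)
        + ((if y = "main" then (9:Int) else 0)
        + ((if y = "inline" then (6:Int) else 0)
        + ((if y = "translations" then (4:Int) else 0)
        + (if y = "security" then (2:Int) else 0))))) := by
  rw [pvWeights, PySem.Dict.getD_eq_get?_getD]
  simp only [PySem.Dict.get?_mk_cons]
  split_ifs with h1 h2 h3 h4 h5 <;> simp_all <;> rfl

-- sum of a 0/one-hot bonus over the filtered pairs, when second components are distinct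
lemma sum_zero_of_no_snd (s : String) (c : Int) : ∀ (L : List (String × String)) (k : String),
    (∀ u ∈ L, u.2 ≠ s) →
    ((L.filter (fun t => t.1 = k)).map (fun t => if t.2 = s then c else 0)).sum = 0
  | [], _, _ => rfl
  | t :: L, k, h => by
    rw [List.filter_cons]
    by_cases hk : t.1 = k
    · rw [if_pos (by simp [hk]), List.map_cons, List.sum_cons,
          if_neg (h t (List.mem_cons_self)), sum_zero_of_no_snd s c L k
            (fun u hu => h u (List.mem_cons_of_mem _ hu))]
      rfl
    · rw [if_neg (by simp [hk])]
      exact sum_zero_of_no_snd s c L k (fun u hu => h u (List.mem_cons_of_mem _ hu))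

lemma sum_onehot : ∀ (L : List (String × String)), L.Pairwise (fun s t => s.2 ≠ t.2) →
    ∀ (k s : String) (c : Int),
    ((L.filter (fun t => t.1 = k)).map (fun t => if t.2 = s then c else 0)).sum
    = if (k, s) ∈ L then c else 0
  | [], _, k, s, c => by simp
  | t :: L, pw, k, s, c => by
    have pw' := (List.pairwise_cons.mp pw)
    rw [List.filter_cons]
    by_cases hk : t.1 = k
    · rw [if_pos (by simp [hk]), List.map_cons, List.sum_cons]
      by_cases hs : t.2 = s
      · have ht : t = (k, s) := by
          apply Prod.ext <;> simp [hk, hs]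
        rw [if_pos hs, if_pos (List.mem_cons.mpr (Or.inl ht.symm))]
        rw [sum_zero_of_no_snd s c L k (fun u hu => by rw [← hs]; exact fun he => pw'.1 u hu he.symm)]
        ring
      · have hne : t ≠ (k, s) := fun he => hs (by rw [he])
        have hmem : ((k, s) ∈ t :: L) ↔ ((k, s) ∈ L) := by
          rw [List.mem_cons]
          exact or_iff_right (fun h1 => hne h1.symm)
        rw [if_neg hs, sum_onehot L pw'.2 k s c, if_congr hmem rfl rfl, zero_add]
    · have hne : t ≠ (k, s) := fun he => hk (by rw [he])
      have hmem : ((k, s) ∈ t :: L) ↔ ((k, s) ∈ L) := by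
        rw [List.mem_cons]
        exact or_iff_right (fun h1 => hne h1.symm)
      rw [if_neg (by simp [hk]), sum_onehot L pw'.2 k s c, if_congr hmem rfl rfl]

-- ==== the endswith bonus pass ====
def bTarget (key s : String) : String :=
  PySem.Str.slice key none (some (PySem.Str.len key - PySem.Str.len ("." ++ s)))

lemma dotted_toList (s : String) : ("." ++ s).toList = '.' :: s.toList := by
  simp [String.toList_append]

lemma end_iff (key s : String) :
    PySem.Str.endswith key ("." ++ s) = true ↔ ('.' :: s.toList) <:+ key.toList := by
  rw [PySem.Str.endswith_eq, dotted_toList, PySem.Chars.endswith_iff]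

lemma target_eq (key s : String) (h : ('.' :: s.toList) <:+ key.toList) :
    bTarget key s
    = String.ofList (List.take (key.toList.length - (s.toList.length + 1)) key.toList) := by
  obtain ⟨a, ha⟩ := h
  have hlen : key.toList.length = a.length + (s.toList.length + 1) := by
    rw [← ha]
    simp
  apply String.toList_inj.mp
  rw [bTarget, PySem.Str.toList_slice, PySem.Chars.slice_eq_listSlice, String.toList_ofList]
  have hm : (0 : Int) ≤ PySem.Str.len key - PySem.Str.len ("." ++ s) := by
    rw [PySem.Str.len_eq, PySem.Str.len_eq, dotted_toList]
    simp only [List.length_cons]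
    push_cast
    omega
  rw [PySem.List.slice_to _ hm]
  congr 1
  rw [PySem.Str.len_eq, PySem.Str.len_eq, dotted_toList]
  have : (↑key.toList.length - ↑(('.' :: s.toList).length) : Int).toNat
      = key.toList.length - (s.toList.length + 1) := by
    simp only [List.length_cons]
    omega
  rw [this]

lemma mem_dpre_iff (key : String) (k s : String) :
    ((k, s) ∈ dpre [] key.toList)
    ↔ (('.' :: s.toList) <:+ key.toList
        ∧ k = String.ofList (List.take (key.toList.length - (s.toList.length + 1)) key.toList)) := by
  rw [mem_dpre]
  constructor
  · rintro ⟨a, b, hab, hx, hy⟩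
    have hb : b = s.toList := by rw [hy, String.toList_ofList]
    subst hb
    have hlen : key.toList.length = a.length + (s.toList.length + 1) := by
      rw [hab]
      simp
    refine ⟨⟨a, hab.symm⟩, ?_⟩
    rw [hx]
    congr 1
    rw [show key.toList.length - (s.toList.length + 1) = a.length by omega, hab,
        List.take_left]
    simp
  · rintro ⟨⟨a, ha⟩, hk⟩
    refine ⟨a, s.toList, ha.symm, ?_, by rw [String.ofList_toList]⟩
    have hlen : key.toList.length = a.length + (s.toList.length + 1) := by
      rw [← ha]
      simp
    rw [hk]
    congr 1
    rw [show key.toList.length - (s.toList.length + 1) = a.length by omega, ← ha,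
        List.take_left]
    simp

-- getD through the bonus pass (generic in the entry list)
lemma getD_bonus (key : String) : ∀ (es : List (String × Int)) (sc : PySem.Dict String Int) (k : String),
    (es.foldl (fun sc e =>
        if PySem.Str.endswith key ("." ++ e.1) then sc.modify (bTarget key e.1) 0 (· + (e.2 - 1))
        else sc) sc).getD k 0
    = sc.getD k 0 + (es.map (fun e =>
        if PySem.Str.endswith key ("." ++ e.1) = true ∧ k = bTarget key e.1 then e.2 - 1 else 0)).sum
  | [], _, _ => by simp
  | e :: es, sc, k => by
    rw [List.foldl_cons, getD_bonus key es _ k, List.map_cons, List.sum_cons]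
    by_cases hg : PySem.Str.endswith key ("." ++ e.1) = true
    · rw [if_pos hg, PySem.Dict.getD_modify]
      by_cases hk : k = bTarget key e.1
      · rw [if_pos hk, if_pos ⟨hg, hk⟩]
        subst hk
        ring
      · rw [if_neg hk, if_neg (fun hc => hk hc.2)]
        ring
    · rw [if_neg hg, if_neg (fun hc => hg hc.1)]
      ring

-- the bonus pass only touches keys that are already present
lemma keys_bonus (key : String) : ∀ (es : List (String × Int)) (sc : PySem.Dict String Int),
    (∀ e ∈ es, PySem.Str.endswith key ("." ++ e.1) = true → bTarget key e.1 ∈ sc.keys) →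
    (es.foldl (fun sc e =>
        if PySem.Str.endswith key ("." ++ e.1) then sc.modify (bTarget key e.1) 0 (· + (e.2 - 1))
        else sc) sc).keys = sc.keys
  | [], _, _ => rfl
  | e :: es, sc, h => by
    rw [List.foldl_cons]
    by_cases hg : PySem.Str.endswith key ("." ++ e.1) = true
    · rw [if_pos hg]
      have hc : sc.contains (bTarget key e.1) = true :=
        (PySem.Dict.contains_iff_mem_keys _ _).mpr (h e List.mem_cons_self hg)
      have hkeys : (sc.modify (bTarget key e.1) 0 (· + (e.2 - 1))).keys = sc.keys := by
        rw [PySem.Dict.keys_modify, PySem.Dict.keys_insert_of_contains _ _ hc]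
      rw [keys_bonus key es _ (fun e' he' hg' => by
            rw [hkeys]; exact h e' (List.mem_cons_of_mem _ he') hg'), hkeys]
    · rw [if_neg hg]
      exact keys_bonus key es sc (fun e' he' hg' => h e' (List.mem_cons_of_mem _ he') hg')

-- membership of a (prefix, suffix) pair determines the bonus guard
lemma entry_iff (key k s : String) :
    ((k, s) ∈ dpre [] key.toList)
    ↔ (PySem.Str.endswith key ("." ++ s) = true ∧ k = bTarget key s) := by
  rw [mem_dpre_iff]
  constructor
  · rintro ⟨hsuf, hk⟩
    exact ⟨(end_iff key s).mpr hsuf, by rw [target_eq key s hsuf]; exact hk⟩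
  · rintro ⟨hend, hk⟩
    have hsuf := (end_iff key s).mp hend
    exact ⟨hsuf, by rw [← target_eq key s hsuf]; exact hk⟩

-- the per-key dict transformations of A and of B coincide
lemma dicts_eq (key : String) (d : PySem.Dict String Int) (hnd : d.keys.Nodup) :
    (dpre [] key.toList).foldl (fun d t => d.modify t.1 0 (· + pvWeights.getD t.2 1)) d
    = pvWeights.items.foldl (fun sc e =>
        if PySem.Str.endswith key ("." ++ e.1) then sc.modify (bTarget key e.1) 0 (· + (e.2 - 1))
        else sc) ((dpre [] key.toList).foldl (fun d t => d.modify t.1 0 (· + 1)) d) := by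
  set L := dpre [] key.toList with hL
  have kA : (L.foldl (fun d t => d.modify t.1 0 (· + pvWeights.getD t.2 1)) d).keys
      = PySem.Set.update d.keys (L.map (fun t => t.1)) :=
    keys_foldl_modify_amt L (fun t => pvWeights.getD t.2 1) d
  have k1 : (L.foldl (fun d t => d.modify t.1 0 (· + 1)) d).keys
      = PySem.Set.update d.keys (L.map (fun t => t.1)) :=
    keys_foldl_modify_amt L (fun _ => 1) d
  have hbonus : ∀ e ∈ pvWeights.items, PySem.Str.endswith key ("." ++ e.1) = true →
      bTarget key e.1 ∈ (L.foldl (fun d t => d.modify t.1 0 (· + 1)) d).keys := by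
    intro e _ hend
    have hmem : (bTarget key e.1, e.1) ∈ L := (entry_iff key _ e.1).mpr ⟨hend, rfl⟩
    rw [k1]
    exact (PySem.Set.mem_update _ _ _).mpr (Or.inr (List.mem_map.mpr ⟨_, hmem, rfl⟩))
  have kB := keys_bonus key pvWeights.items _ hbonus
  apply PySem.Dict.ext
  have nodupA : (L.foldl (fun d t => d.modify t.1 0 (· + pvWeights.getD t.2 1)) d).keys.Nodup := by
    rw [kA]; exact PySem.Set.nodup_update _ _ hnd
  have nodupB : (pvWeights.items.foldl (fun sc e =>
      if PySem.Str.endswith key ("." ++ e.1) then sc.modify (bTarget key e.1) 0 (· + (e.2 - 1))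
      else sc) (L.foldl (fun d t => d.modify t.1 0 (· + 1)) d)).keys.Nodup := by
    rw [kB, k1]; exact PySem.Set.nodup_update _ _ hnd
  rw [PySem.Dict.items_eq_map_keys _ nodupA 0, PySem.Dict.items_eq_map_keys _ nodupB 0,
      kA, kB, k1]
  apply List.map_congr_left
  intro k _
  refine congrArg₂ _ rfl ?_
  -- value equality at every key k
  rw [getD_bonus key, getD_foldl_modify_amt L (fun _ => 1) d k,
      getD_foldl_modify_amt L (fun t => pvWeights.getD t.2 1) d k]
  have hpw : L.Pairwise (fun s t => s.2 ≠ t.2) := dpre_pairwise _ _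
  have hexp : ((L.filter (fun t => t.1 = k)).map (fun t => pvWeights.getD t.2 1)).sum
      = ((L.filter (fun t => t.1 = k)).map (fun _ => (1 : Int))).sum
        + (((L.filter (fun t => t.1 = k)).map (fun t => if t.2 = "inline.token_obtainment" then (14:Int) else 0)).sum
        + (((L.filter (fun t => t.1 = k)).map (fun t => if t.2 = "main" then (9:Int) else 0)).sum
        + (((L.filter (fun t => t.1 = k)).map (fun t => if t.2 = "inline" then (6:Int) else 0)).sum
        + (((L.filter (fun t => t.1 = k)).map (fun t => if t.2 = "translations" then (4:Int) else 0)).sum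
        + ((L.filter (fun t => t.1 = k)).map (fun t => if t.2 = "security" then (2:Int) else 0)).sum)))) := by
    have h1 : ((L.filter (fun t => t.1 = k)).map (fun t => pvWeights.getD t.2 1)).sum
        = ((L.filter (fun t => t.1 = k)).map (fun t => 1
            + ((if t.2 = "inline.token_obtainment" then (14:Int) else 0)
            + ((if t.2 = "main" then (9:Int) else 0)
            + ((if t.2 = "inline" then (6:Int) else 0)
            + ((if t.2 = "translations" then (4:Int) else 0)
            + (if t.2 = "security" then (2:Int) else 0))))))).sum := by
      apply congrArg List.sum
      apply List.map_congr_left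
      intro t _
      exact weight_expand t.2
    rw [h1, PySem.List.sum_map_add_int, PySem.List.sum_map_add_int, PySem.List.sum_map_add_int,
        PySem.List.sum_map_add_int, PySem.List.sum_map_add_int]
  rw [hexp, sum_onehot _ hpw, sum_onehot _ hpw, sum_onehot _ hpw, sum_onehot _ hpw,
      sum_onehot _ hpw]
  have hitems : pvWeights.items
      = [("inline.token_obtainment", (15:Int)), ("main", 10), ("inline", 7),
         ("translations", 5), ("security", 3)] := rfl
  rw [hitems, List.map_cons, List.map_cons, List.map_cons, List.map_cons, List.map_cons,
      List.map_nil, List.sum_cons, List.sum_cons, List.sum_cons, List.sum_cons, List.sum_cons,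
      List.sum_nil]
  rw [if_congr (entry_iff key k "inline.token_obtainment") rfl rfl,
      if_congr (entry_iff key k "main") rfl rfl,
      if_congr (entry_iff key k "inline") rfl rfl,
      if_congr (entry_iff key k "translations") rfl rfl,
      if_congr (entry_iff key k "security") rfl rfl]
  norm_num
  ring

-- A's per-key step over the dot decomposition
lemma stepA_eq (key : String) (d : PySem.Dict String Int) :
    (let parts := (PySem.Str.split? key ".").getD []
     (PySem.List.pyRange 1 (parts.length : Int)).foldl (fun scores i =>
        let pfx := PySem.Str.join "." (PySem.List.slice parts none (some i))
        let sfx := PySem.Str.join "." (PySem.List.slice parts (some i) none)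
        let weight := pvWeights.getD sfx 1
        scores.modify pfx 0 (· + weight)) d)
    = (dpre [] key.toList).foldl (fun d t => d.modify t.1 0 (· + pvWeights.getD t.2 1)) d := by
  show ((PySem.List.pyRange 1 (((PySem.Str.split? key ".").getD []).length : Int)).foldl _ d) = _
  obtain ⟨m, ms, hm⟩ : ∃ m ms, mySplit [] key.toList = m :: ms := by
    cases hm : mySplit [] key.toList with
    | nil => exact absurd hm (mySplit_ne_nil _ _)
    | cons m ms => exact ⟨m, ms, rfl⟩
  have hparts : (PySem.Str.split? key ".").getD []
      = String.ofList m :: ms.map String.ofList := by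
    rw [split_eq, Option.getD_some, hm, List.map_cons]
  rw [hparts]
  rw [a_inner (String.ofList m) (ms.map String.ofList) d]
  rw [a_step_pl]
  rw [main_pl_dpre key.toList [] (String.ofList m) (ms.map String.ofList)
      (by rw [hm, List.map_cons])]

-- B's per-key step: the +1 pass followed by the endswith bonus pass
lemma stepB_eq (key : String) (d : PySem.Dict String Int) :
    (let sp := key.toList.foldl (fun (sp : PySem.Dict String Int × String) c =>
        if c = '.' then (sp.1.modify sp.2 0 (· + 1), sp.2.push c)
        else (sp.1, sp.2.push c)) (d, "")
     pvWeights.items.foldl (fun sc e =>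
        let dotted := "." ++ e.1
        if PySem.Str.endswith key dotted then
          let p := PySem.Str.slice key none (some (PySem.Str.len key - PySem.Str.len dotted))
          sc.modify p 0 (· + (e.2 - 1))
        else sc) sp.1)
    = pvWeights.items.foldl (fun sc e =>
        if PySem.Str.endswith key ("." ++ e.1) then sc.modify (bTarget key e.1) 0 (· + (e.2 - 1))
        else sc) ((dpre [] key.toList).foldl (fun d t => d.modify t.1 0 (· + 1)) d) := by
  show (pvWeights.items.foldl _ (key.toList.foldl _ ((d : PySem.Dict String Int), ("" : String))).1) = _
  rw [b_pass1 key.toList "" d]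
  rfl

-- the per-key steps agree on every Nodup-keyed dict, and preserve Nodup
lemma stepB_keys (key : String) (d : PySem.Dict String Int) (hnd : d.keys.Nodup) :
    ((dpre [] key.toList).foldl (fun d t => d.modify t.1 0 (· + pvWeights.getD t.2 1)) d).keys.Nodup := by
  rw [keys_foldl_modify_amt]
  exact PySem.Set.nodup_update _ _ hnd

-- outer fold congruence under the Nodup-keys invariant
lemma outer_eq : ∀ (ks : List String) (d : PySem.Dict String Int), d.keys.Nodup →
    ks.foldl (fun scores key =>
      let parts := (PySem.Str.split? key ".").getD []
      (PySem.List.pyRange 1 (parts.length : Int)).foldl (fun scores i =>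
        let pfx := PySem.Str.join "." (PySem.List.slice parts none (some i))
        let sfx := PySem.Str.join "." (PySem.List.slice parts (some i) none)
        let weight := pvWeights.getD sfx 1
        scores.modify pfx 0 (· + weight)) scores) d
    = ks.foldl (fun scores key =>
      let sp := key.toList.foldl (fun (sp : PySem.Dict String Int × String) c =>
          if c = '.' then (sp.1.modify sp.2 0 (· + 1), sp.2.push c)
          else (sp.1, sp.2.push c)) (scores, "")
      pvWeights.items.foldl (fun sc e =>
        let dotted := "." ++ e.1
        if PySem.Str.endswith key dotted then
          let p := PySem.Str.slice key none (some (PySem.Str.len key - PySem.Str.len dotted))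
          sc.modify p 0 (· + (e.2 - 1))
        else sc) sp.1) d
  | [], _, _ => rfl
  | key :: ks, d, hnd => by
    rw [List.foldl_cons, List.foldl_cons]
    have hstep : (let parts := (PySem.Str.split? key ".").getD []
        (PySem.List.pyRange 1 (parts.length : Int)).foldl (fun scores i =>
          let pfx := PySem.Str.join "." (PySem.List.slice parts none (some i))
          let sfx := PySem.Str.join "." (PySem.List.slice parts (some i) none)
          let weight := pvWeights.getD sfx 1
          scores.modify pfx 0 (· + weight)) d)
        = (let sp := key.toList.foldl (fun (sp : PySem.Dict String Int × String) c =>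
            if c = '.' then (sp.1.modify sp.2 0 (· + 1), sp.2.push c)
            else (sp.1, sp.2.push c)) (d, "")
          pvWeights.items.foldl (fun sc e =>
            let dotted := "." ++ e.1
            if PySem.Str.endswith key dotted then
              let p := PySem.Str.slice key none (some (PySem.Str.len key - PySem.Str.len dotted))
              sc.modify p 0 (· + (e.2 - 1))
            else sc) sp.1) := by
      rw [stepA_eq key d, stepB_eq key d, dicts_eq key d hnd]
    rw [← hstep]
    exact outer_eq ks _ (stepA_eq key d ▸ stepB_keys key d hnd)

-- keys of B's per-key step stay Nodup
lemma stepB_nodup (key : String) (d : PySem.Dict String Int) (hnd : d.keys.Nodup) :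
    (let sp := key.toList.foldl (fun (sp : PySem.Dict String Int × String) c =>
        if c = '.' then (sp.1.modify sp.2 0 (· + 1), sp.2.push c)
        else (sp.1, sp.2.push c)) (d, "")
     pvWeights.items.foldl (fun sc e =>
        let dotted := "." ++ e.1
        if PySem.Str.endswith key dotted then
          let p := PySem.Str.slice key none (some (PySem.Str.len key - PySem.Str.len dotted))
          sc.modify p 0 (· + (e.2 - 1))
        else sc) sp.1).keys.Nodup := by
  rw [stepB_eq key d]
  have hbonus : ∀ e ∈ pvWeights.items, PySem.Str.endswith key ("." ++ e.1) = true →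
      bTarget key e.1 ∈ ((dpre [] key.toList).foldl (fun d t => d.modify t.1 0 (· + 1)) d).keys := by
    intro e _ hend
    rw [keys_foldl_modify_amt (dpre [] key.toList) (fun _ => 1) d]
    exact (PySem.Set.mem_update _ _ _).mpr
      (Or.inr (List.mem_map.mpr ⟨_, (entry_iff key _ e.1).mpr ⟨hend, rfl⟩, rfl⟩))
  rw [keys_bonus key pvWeights.items _ hbonus,
      keys_foldl_modify_amt (dpre [] key.toList) (fun _ => 1) d]
  exact PySem.Set.nodup_update _ _ hnd

lemma scores_nodup : ∀ (ks : List String) (d : PySem.Dict String Int), d.keys.Nodup →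
    (ks.foldl (fun scores key =>
      let sp := key.toList.foldl (fun (sp : PySem.Dict String Int × String) c =>
          if c = '.' then (sp.1.modify sp.2 0 (· + 1), sp.2.push c)
          else (sp.1, sp.2.push c)) (scores, "")
      pvWeights.items.foldl (fun sc e =>
        let dotted := "." ++ e.1
        if PySem.Str.endswith key dotted then
          let p := PySem.Str.slice key none (some (PySem.Str.len key - PySem.Str.len dotted))
          sc.modify p 0 (· + (e.2 - 1))
        else sc) sp.1) d).keys.Nodup
  | [], _, h => h
  | key :: ks, d, h => by
    rw [List.foldl_cons]
    exact scores_nodup ks _ (stepB_nodup key d h)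

-- first maximum over (k, f k) pairs = first maximum over keys by f
lemma maxeq (f : String → Int)
    (g : Option (String × Int) → String × Int → Option (String × Int))
    (h : Option String → String → Option String)
    (hg1 : ∀ kv, g none kv = some kv)
    (hg2 : ∀ m kv, g (some m) kv = if m.2 < kv.2 then some kv else some m)
    (hh1 : ∀ x, h none x = some x)
    (hh2 : ∀ m x, h (some m) x = if f m < f x then some x else some m) :
    ∀ (ks : List String) (acc : Option String),
    (List.foldl g (acc.map (fun k => (k, f k))) (ks.map (fun k => (k, f k)))).map Prod.fst
    = List.foldl h acc ks
  | [], acc => by cases acc <;> simp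
  | k :: ks, acc => by
    rw [List.map_cons, List.foldl_cons, List.foldl_cons]
    cases acc with
    | none =>
      rw [Option.map_none, hg1, hh1]
      exact maxeq f g h hg1 hg2 hh1 hh2 ks (some k)
    | some m =>
      rw [Option.map_some, hg2, hh2]
      by_cases hc : f m < f k
      · rw [if_pos hc, if_pos hc]
        exact maxeq f g h hg1 hg2 hh1 hh2 ks (some k)
      · rw [if_neg hc, if_neg hc]
        exact maxeq f g h hg1 hg2 hh1 hh2 ks (some m)

lemma maxeq0 (f : String → Int)
    (g : Option (String × Int) → String × Int → Option (String × Int))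
    (h : Option String → String → Option String)
    (hg1 : ∀ kv, g none kv = some kv)
    (hg2 : ∀ m kv, g (some m) kv = if m.2 < kv.2 then some kv else some m)
    (hh1 : ∀ x, h none x = some x)
    (hh2 : ∀ m x, h (some m) x = if f m < f x then some x else some m)
    (ks : List String) :
    (List.foldl g none (ks.map (fun k => (k, f k)))).map Prod.fst = List.foldl h none ks := by
  simpa using maxeq f g h hg1 hg2 hh1 hh2 ks none


-- ===== VERDICT (by name: the statement is the Claim_ definition above) =====
theorem find_userbot_spec : Claim_equal_find_userbot := by
  intro keys _
  unfold Spec_find_userbot find_userbot find_userbot_alt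
  simp only []
  rw [outer_eq keys PySem.Dict.empty (by simp [PySem.Dict.empty, PySem.Dict.keys])]
  set scores := keys.foldl (fun scores key =>
      let sp := key.toList.foldl (fun (sp : PySem.Dict String Int × String) c =>
          if c = '.' then (sp.1.modify sp.2 0 (· + 1), sp.2.push c)
          else (sp.1, sp.2.push c)) (scores, "")
      pvWeights.items.foldl (fun sc e =>
        let dotted := "." ++ e.1
        if PySem.Str.endswith key dotted then
          let p := PySem.Str.slice key none (some (PySem.Str.len key - PySem.Str.len dotted))
          sc.modify p 0 (· + (e.2 - 1))
        else sc) sp.1) PySem.Dict.empty with hs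
  have hnd : scores.keys.Nodup := by
    apply scores_nodup
    simp [PySem.Dict.empty, PySem.Dict.keys]
  cases hitems : scores.items with
  | nil =>
    simp
  | cons kv rest =>
    rw [show (kv :: rest : List (String × Int)).isEmpty = false from rfl]
    simp only [Bool.false_eq_true, if_false]
    rw [← hitems, PySem.Dict.items_eq_map_keys scores hnd 0]
    rw [PySem.List.max?]
    apply Eq.symm
    apply maxeq0 (fun k => scores.getD k 0) <;> (intros; rfl)
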